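-- pv_equiv track=rewrite | github.com/023-dev/ProgrammersOnlineJudge | 프로그래머스/1/12954. x만큼 간격이 있는 n개의 숫자/x만큼 간격이 있는 n개의 숫자.py | solution
-- ===== SOURCE A (Python) =====
-- def solution(x, n):
--     answer = []
--     if x != 0:
--         for i in range(x, x*(n+1), x):
--             answer.append(i)
--     else:
--         for _ in range(n):
--             answer.append(0)
--     return answer
-- ===== SOURCE B (Python) =====
-- def solution(x, n):
--     return [x * i for i in range(1, n + 1)]
-- ===== Notes on version B (the rewrite author's own statement) =====
-- stated objective: simpler
-- what changed: B computes each element directly as x*i for i in 1..n in one uniform comprehension, dropping A's x==0 special-case branch and its stepped range with explicit appends.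
import Mathlib
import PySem

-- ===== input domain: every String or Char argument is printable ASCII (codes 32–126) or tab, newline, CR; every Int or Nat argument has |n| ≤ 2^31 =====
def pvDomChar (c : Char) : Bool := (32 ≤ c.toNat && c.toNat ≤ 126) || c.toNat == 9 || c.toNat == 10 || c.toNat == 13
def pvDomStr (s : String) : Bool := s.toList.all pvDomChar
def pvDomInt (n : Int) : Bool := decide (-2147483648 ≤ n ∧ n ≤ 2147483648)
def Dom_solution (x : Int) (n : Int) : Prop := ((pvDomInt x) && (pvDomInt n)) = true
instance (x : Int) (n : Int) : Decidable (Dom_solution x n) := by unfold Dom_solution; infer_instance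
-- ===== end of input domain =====

-- B lists x*i for i = 1..n in one uniform pass, dropping A's x == 0 special-case branch (simpler).

-- ===== PORT A =====
def solution (x : Int) (n : Int) : List Int :=
  let answer : List Int := []
  if x ≠ 0 then
    (PySem.List.pyRange x (x * (n + 1)) x).foldl (fun acc i => acc ++ [i]) answer
  else
    (PySem.List.pyRange 0 n 1).foldl (fun acc _ => acc ++ [(0 : Int)]) answer

-- ===== PORT B =====
def solution_alt (x : Int) (n : Int) : List Int :=
  (PySem.List.pyRange 1 (n + 1) 1).map (fun i => x * i)

-- ===== PRECONDITION & SPEC =====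
def Spec_solution (x : Int) (n : Int) (out : List Int) : Prop := out = solution_alt x n
instance (x : Int) (n : Int) (out : List Int) : Decidable (Spec_solution x n out) := by unfold Spec_solution; infer_instance

-- ===== CLAIM (what is proved, stated in full; the proofs are below) =====
def Claim_equal_solution : Prop := ∀ (x : Int) (n : Int), Dom_solution x n → Spec_solution x n (solution x n)

-- ===== LEMMAS AND PROOFS =====

theorem pv_foldl_snoc (l : List Int) (a : List Int) :
    l.foldl (fun acc i => acc ++ [i]) a = a ++ l := by
  induction l generalizing a with
  | nil => simp
  | cons h t ih => simp [List.foldl, ih]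

theorem pv_foldl_zero (l : List Int) (a : List Int) :
    l.foldl (fun acc _ => acc ++ [(0 : Int)]) a = a ++ l.map (fun _ => (0 : Int)) := by
  induction l generalizing a with
  | nil => simp
  | cons h t ih => simp [List.foldl, ih]

theorem pv_count_pos (x n : Int) (hx : 0 < x) :
    (if x < x * (n + 1) then ((x * (n + 1) - x + x - 1) / x).toNat else 0) = n.toNat := by
  have hcond : x < x * (n + 1) ↔ 0 < n := by
    constructor
    · intro h; nlinarith
    · intro h; nlinarith
  by_cases hn : 0 < n
  · rw [if_pos (hcond.mpr hn)]
    have harith : x * (n + 1) - x + x - 1 = (x - 1) + x * n := by ring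
    rw [harith, Int.add_mul_ediv_left _ _ (ne_of_gt hx),
        Int.ediv_eq_zero_of_lt (by omega) (by omega)]
    simp
  · rw [if_neg (fun h => hn (hcond.mp h))]
    omega

theorem pv_pyRange_mult (x n : Int) (hx : x ≠ 0) :
    PySem.List.pyRange x (x * (n + 1)) x
      = (List.range n.toNat).map (fun k : Nat => x + x * (k : Int)) := by
  rcases lt_or_gt_of_ne hx with hneg | hpos
  · -- x < 0
    have h0 : ¬ (0 : Int) < x := by omega
    simp only [PySem.List.pyRange, if_neg hx, if_neg h0]
    have hcond : x * (n + 1) < x ↔ 0 < n := by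
      constructor
      · intro h; nlinarith
      · intro h; nlinarith
    have : (if x * (n + 1) < x then ((x - x * (n + 1) + -x - 1) / -x).toNat else 0) = n.toNat := by
      have := pv_count_pos (-x) n (by omega)
      have harith : -x * (n + 1) - -x + -x - 1 = x - x * (n + 1) + -x - 1 := by ring
      have hcond' : (-x) < (-x) * (n + 1) ↔ x * (n + 1) < x := by constructor <;> intro h <;> nlinarith
      rw [harith] at this
      simp only [hcond'] at this
      exact this
    rw [this]
  · -- 0 < x
    simp only [PySem.List.pyRange, if_neg hx, if_pos hpos]
    rw [pv_count_pos x n hpos]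

theorem pv_solution_eq (x n : Int) : solution x n = solution_alt x n := by
  unfold solution solution_alt
  by_cases hx : x = 0
  · subst hx
    simp only [ne_eq, not_true_eq_false, if_false]
    rw [pv_foldl_zero, List.nil_append, PySem.List.pyRange_one, PySem.List.pyRange_one]
    simp
  · rw [if_pos hx, pv_foldl_snoc, List.nil_append, pv_pyRange_mult x n hx,
        PySem.List.pyRange_one]
    have : n + 1 - 1 = n := by ring
    rw [this, List.map_map]
    simp only [Function.comp_def]
    apply List.map_congr_left
    intro k _
    ring

-- ===== VERDICT (by name: the statement is the Claim_ definition above) =====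
theorem solution_spec : Claim_equal_solution := by
  intro x n _
  unfold Spec_solution
  exact pv_solution_eq x n
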